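-- pv_equiv track=rewrite | github.com/olegario96/stormtech-challenge | app/utilities.py | compare_books_by_one_attribute
-- ===== SOURCE A (Python) =====
-- def compare_books_by_one_attribute(b1, b2, attribute, desc=False):
--     """
--         This function compare two books using one of its attributes.
--         As the only sorting criteria is the alphabetical, both of
--         attributes are compared char by char. The default value for
--         ordering is ascending. With the ordering value is descending,
--         the function just invert the final answer, saying that first
--         book has less priority than second, or vice-versa.
--     """
--     attribute_b1, attribute_b2 = b1.get(attribute), b2.get(attribute)
--     min_len = min(len(attribute_b1), len(attribute_b2))
--     result = None
--     for i in range(0, min_len):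
--
--         if attribute_b1[i] < attribute_b2[i]:
--             result = True
--             break
--         elif attribute_b1[i] > attribute_b2[i]:
--             result = False
--             break
--
--     if not desc:
--         return result
--     else:
--         return not result
-- ===== SOURCE B (Python) =====
-- def compare_books_by_one_attribute(b1, b2, attribute, desc=False):
--     """Compare the books' attribute by native string comparison on the
--     common-length prefixes instead of a char-by-char loop."""
--     attribute_b1, attribute_b2 = b1.get(attribute), b2.get(attribute)
--     min_len = min(len(attribute_b1), len(attribute_b2))
--     p1, p2 = attribute_b1[:min_len], attribute_b2[:min_len]
--     result = None if p1 == p2 else (p1 < p2)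
--     return result if not desc else not result
-- ===== Notes on version B (the rewrite author's own statement) =====
-- stated objective: simpler
-- what changed: Replaces the explicit char-by-char loop with break by slicing both attributes to the common length and delegating to Python's native string equality/less-than.
import Mathlib
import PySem

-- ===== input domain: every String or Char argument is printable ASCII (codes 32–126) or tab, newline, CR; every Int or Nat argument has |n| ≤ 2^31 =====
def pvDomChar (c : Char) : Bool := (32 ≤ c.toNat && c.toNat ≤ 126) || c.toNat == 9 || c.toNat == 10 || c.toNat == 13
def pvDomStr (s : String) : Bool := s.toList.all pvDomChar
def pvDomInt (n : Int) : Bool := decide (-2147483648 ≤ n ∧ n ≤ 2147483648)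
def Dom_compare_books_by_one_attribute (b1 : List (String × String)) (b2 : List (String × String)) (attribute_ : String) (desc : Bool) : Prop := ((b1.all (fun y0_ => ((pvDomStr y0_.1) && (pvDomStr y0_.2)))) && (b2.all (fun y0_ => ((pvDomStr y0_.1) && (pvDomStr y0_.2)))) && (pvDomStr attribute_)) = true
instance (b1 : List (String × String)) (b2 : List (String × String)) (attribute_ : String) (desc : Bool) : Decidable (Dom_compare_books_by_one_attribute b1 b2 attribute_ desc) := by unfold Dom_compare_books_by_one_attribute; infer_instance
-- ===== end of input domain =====

-- B replaces A's char-by-char loop with prefix slicing and one native string comparison (objective: simpler).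
-- Pre_ excludes inputs where `attribute_` is missing from either dict: there A raises TypeError (len(None)).

-- ===== PORT A =====
-- the `for i in range(0, min_len)` loop with its two breaks, walking both char lists in step
def pvLoopA : List Char → List Char → Option Bool
  | c1 :: r1, c2 :: r2 =>
      if c1 < c2 then some true
      else if c2 < c1 then some false
      else pvLoopA r1 r2
  | _, _ => none

def compare_books_by_one_attribute (b1 : List (String × String)) (b2 : List (String × String)) (attribute_ : String) (desc : Bool) : Option Bool :=
  match (PySem.Dict.ofList b1).get? attribute_, (PySem.Dict.ofList b2).get? attribute_ with
  | some a1, some a2 =>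
      let result := pvLoopA a1.toList a2.toList
      if !desc then result
      else some (match result with | none => true | some b => !b)   -- Python `not result`: not None = True
  | _, _ => none  -- outside Pre_: Python raises TypeError

-- ===== PORT B =====
def compare_books_by_one_attribute_alt (b1 : List (String × String)) (b2 : List (String × String)) (attribute_ : String) (desc : Bool) : Option Bool :=
  match (PySem.Dict.ofList b1).get? attribute_ with
  | none => none  -- outside Pre_: Python raises TypeError
  | some a1 =>
    match (PySem.Dict.ofList b2).get? attribute_ with
    | none => none  -- outside Pre_: Python raises TypeError
    | some a2 =>
      let m := min a1.toList.length a2.toList.length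
      let p1 := a1.toList.take m
      let p2 := a2.toList.take m
      let result : Option Bool := if p1 = p2 then none else some (decide (p1 < p2))
      if !desc then result
      else some (result.elim true (!·))   -- Python `not result`: not None = True

-- ===== PRECONDITION & SPEC =====
-- Pre_ : the attribute is present in both dicts (otherwise A raises TypeError on len(None)).
def Pre_compare_books_by_one_attribute (b1 : List (String × String)) (b2 : List (String × String)) (attribute_ : String) (desc : Bool) : Prop :=
  (PySem.Dict.ofList b1).get? attribute_ ≠ none ∧ (PySem.Dict.ofList b2).get? attribute_ ≠ none
instance (b1 : List (String × String)) (b2 : List (String × String)) (attribute_ : String) (desc : Bool) : Decidable (Pre_compare_books_by_one_attribute b1 b2 attribute_ desc) := by unfold Pre_compare_books_by_one_attribute; infer_instance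
def pvWitness_compare_books_by_one_attribute : (List (String × String)) × (List (String × String)) × String × Bool :=
  ([("title", "abc")], [("title", "abd")], "title", false)
def Spec_compare_books_by_one_attribute (b1 : List (String × String)) (b2 : List (String × String)) (attribute_ : String) (desc : Bool) (out : Option Bool) : Prop := out = compare_books_by_one_attribute_alt b1 b2 attribute_ desc
instance (b1 : List (String × String)) (b2 : List (String × String)) (attribute_ : String) (desc : Bool) (out : Option Bool) : Decidable (Spec_compare_books_by_one_attribute b1 b2 attribute_ desc out) := by unfold Spec_compare_books_by_one_attribute; infer_instance

-- ===== CLAIM (what is proved, stated in full; the proofs are below) =====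
def Claim_equal_compare_books_by_one_attribute : Prop := ∀ (b1 : List (String × String)) (b2 : List (String × String)) (attribute_ : String) (desc : Bool), Dom_compare_books_by_one_attribute b1 b2 attribute_ desc → Pre_compare_books_by_one_attribute b1 b2 attribute_ desc → Spec_compare_books_by_one_attribute b1 b2 attribute_ desc (compare_books_by_one_attribute b1 b2 attribute_ desc)

-- ===== LEMMAS AND PROOFS =====
-- A's loop result equals B's prefix comparison, for any two char lists.
lemma pvLoopA_eq_prefix (l1 l2 : List Char) :
    pvLoopA l1 l2 =
      (if l1.take (min l1.length l2.length) = l2.take (min l1.length l2.length) then none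
       else some (decide (l1.take (min l1.length l2.length) < l2.take (min l1.length l2.length)))) := by
  induction l1 generalizing l2 with
  | nil => simp [pvLoopA]
  | cons c1 r1 ih =>
    cases l2 with
    | nil => simp [pvLoopA]
    | cons c2 r2 =>
      simp only [List.length_cons, Nat.succ_min_succ, List.take_succ_cons, pvLoopA]
      by_cases h1 : c1 < c2
      · simp [h1, List.cons_lt_cons_iff, ne_of_lt h1]
      · by_cases h2 : c2 < c1
        · simp [h1, h2, List.cons_lt_cons_iff, (ne_of_lt h2).symm]
        · have hc : c1 = c2 := le_antisymm (not_lt.mp h2) (not_lt.mp h1)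
          subst hc
          rw [ih r2]
          by_cases he : r1.take (min r1.length r2.length) = r2.take (min r1.length r2.length)
          · simp [he]
          · simp [he]

-- ===== VERDICT (by name: the statement is the Claim_ definition above) =====
theorem compare_books_by_one_attribute_spec : Claim_equal_compare_books_by_one_attribute := by
  intro b1 b2 attribute_ desc _ hpre
  unfold Spec_compare_books_by_one_attribute
  unfold compare_books_by_one_attribute compare_books_by_one_attribute_alt
  obtain ⟨h1, h2⟩ := hpre
  cases hg1 : (PySem.Dict.ofList b1).get? attribute_ with
  | none => exact absurd hg1 h1
  | some a1 =>
    cases hg2 : (PySem.Dict.ofList b2).get? attribute_ with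
    | none => exact absurd hg2 h2
    | some a2 =>
      simp only [pvLoopA_eq_prefix, String.length_toList]
      by_cases he : List.take (min a1.length a2.length) a1.toList = List.take (min a1.length a2.length) a2.toList <;>
        cases desc <;> simp [he, Option.elim]
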